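-- pv_equiv track=rewrite | github.com/VIKRAM009KILLER/compprogram2 | 06-get_kth_digit-Python/get_kth_digit.py | fun_get_kth_digit
-- ===== SOURCE A (Python) =====
-- def fun_get_kth_digit(digit, k):
-- 	n = abs(digit)
--
-- 	count = 0
--
-- 	while n != 0:
-- 		d = n % 10
-- 		if count == k:
-- 			return d
-- 		count += 1
-- 		n = n // 10
-- 	return 0
-- ===== SOURCE B (Python) =====
-- def fun_get_kth_digit(digit, k):
--     n = abs(digit)
--     if k < 0 or k >= n.bit_length():
--         # 10**k > n here (2**bit_length > n), so the digit is 0; avoids a huge power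
--         return 0
--     return n // 10 ** k % 10
-- ===== Notes on version B (the rewrite author's own statement) =====
-- stated objective: simpler
-- what changed: Replaces the digit-peeling while loop with the closed form n // 10**k % 10, guarding k < 0 and short-circuiting k >= n.bit_length() (where the digit is provably 0) so no huge power is ever computed.
import Mathlib
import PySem

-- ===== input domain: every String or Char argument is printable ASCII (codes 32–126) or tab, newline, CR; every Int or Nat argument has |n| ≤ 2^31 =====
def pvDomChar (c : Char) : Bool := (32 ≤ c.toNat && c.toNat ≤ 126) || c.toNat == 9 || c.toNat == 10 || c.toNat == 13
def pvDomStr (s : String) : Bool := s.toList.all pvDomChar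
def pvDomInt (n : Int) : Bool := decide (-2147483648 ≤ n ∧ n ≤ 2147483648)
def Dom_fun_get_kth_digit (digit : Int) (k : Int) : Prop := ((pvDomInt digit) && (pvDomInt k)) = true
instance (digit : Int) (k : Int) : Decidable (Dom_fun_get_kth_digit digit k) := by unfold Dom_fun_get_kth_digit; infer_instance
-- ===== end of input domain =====

-- B replaces A's digit-peeling loop by the closed form n // 10**k % 10 (guards: k < 0, and k >= n.bit_length() where the digit is 0, avoiding a huge power); objective: simpler.

-- ===== PORT A =====
-- A's while loop over n = abs(digit), peeling one decimal digit per iteration.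
def fun_get_kth_digit_loop (n : Nat) (count : Int) (k : Int) : Int :=
  if h : n = 0 then 0
  else
    let d : Nat := n % 10
    if count = k then (d : Int)
    else fun_get_kth_digit_loop (n / 10) (count + 1) k
termination_by n
decreasing_by exact Nat.div_lt_self (Nat.pos_of_ne_zero h) (by norm_num)

def fun_get_kth_digit (digit : Int) (k : Int) : Int :=
  fun_get_kth_digit_loop digit.natAbs 0 k

-- ===== PORT B =====
def fun_get_kth_digit_alt (digit : Int) (k : Int) : Int :=
  let n : Int := |digit|
  if k < 0 ∨ (PySem.Int.bitLength n : Int) ≤ k then 0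
  else PySem.Int.mod (PySem.Int.floordiv n ((10 : Int) ^ k.toNat)) 10

-- ===== PRECONDITION & SPEC =====
def Spec_fun_get_kth_digit (digit : Int) (k : Int) (out : Int) : Prop := out = fun_get_kth_digit_alt digit k
instance (digit : Int) (k : Int) (out : Int) : Decidable (Spec_fun_get_kth_digit digit k out) := by unfold Spec_fun_get_kth_digit; infer_instance

-- ===== CLAIM (what is proved, stated in full; the proofs are below) =====
def Claim_equal_fun_get_kth_digit : Prop := ∀ (digit : Int) (k : Int), Dom_fun_get_kth_digit digit k → Spec_fun_get_kth_digit digit k (fun_get_kth_digit digit k)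

-- ===== LEMMAS AND PROOFS =====

-- Loop characterisation: the loop returns digit (k - count) of n in closed form (0 when k < count).
theorem fun_get_kth_digit_loop_eq (n : Nat) (c k : Int) :
    fun_get_kth_digit_loop n c k =
      if k < c then 0 else ((n / 10 ^ (k - c).toNat % 10 : Nat) : Int) := by
  induction n using Nat.strong_induction_on generalizing c with
  | _ n ih =>
    rw [fun_get_kth_digit_loop]
    by_cases h : n = 0
    · simp [h, Nat.zero_div]
    · simp only [h, dite_false]
      by_cases hc : c = k
      · subst hc
        simp
      · have hrec := ih (n / 10) (Nat.div_lt_self (Nat.pos_of_ne_zero h) (by norm_num)) (c + 1)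
        simp only [hc, if_false, hrec]
        by_cases hk : k < c + 1
        · have hk' : k < c ∨ k = c := by omega
          rcases hk' with hk' | hk'
          · simp [hk', hk]
          · exact absurd hk'.symm hc
        · have hk2 : ¬ k < c := by omega
          simp only [hk, if_false, hk2]
          have ht : (k - c).toNat = (k - (c + 1)).toNat + 1 := by omega
          rw [ht, pow_succ, Nat.mul_comm, ← Nat.div_div_eq_div_mul]

-- In the guarded region k ≥ bit_length n the kth decimal digit of n is 0.
theorem guard_digit_zero (n : Nat) (k : Int) (hk : 0 ≤ k)
    (hb : (PySem.Int.bitLength (n : Int) : Int) ≤ k) : n / 10 ^ k.toNat % 10 = 0 := by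
  have h1 : n < 2 ^ PySem.Int.bitLength (n : Int) := by
    have := PySem.Int.lt_two_pow_bitLength (n : Int)
    simpa using this
  have h2 : (2 : Nat) ^ PySem.Int.bitLength (n : Int) ≤ 2 ^ k.toNat :=
    Nat.pow_le_pow_right (by norm_num) (by omega)
  have h3 : (2 : Nat) ^ k.toNat ≤ 10 ^ k.toNat :=
    Nat.pow_le_pow_left (by norm_num) _
  have : n / 10 ^ k.toNat = 0 := Nat.div_eq_of_lt (by omega)
  simp [this]

theorem fun_get_kth_digit_spec : Claim_equal_fun_get_kth_digit := by
  intro digit k _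
  unfold Spec_fun_get_kth_digit fun_get_kth_digit fun_get_kth_digit_alt
  rw [fun_get_kth_digit_loop_eq]
  by_cases hk : k < 0
  · simp [hk]
  · simp only [hk, if_false]
    by_cases hb : (PySem.Int.bitLength |digit| : Int) ≤ k
    · have h0 : (k - 0).toNat = k.toNat := by omega
      have hz : digit.natAbs / 10 ^ k.toNat % 10 = 0 :=
        guard_digit_zero digit.natAbs k (by omega)
          (by rw [← Int.abs_eq_natAbs]; exact hb)
      simp [hb, hz]
    · simp only [hb, or_self, if_false]
      have habs : |digit| = (digit.natAbs : Int) := Int.abs_eq_natAbs digit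
      have hpow : ((10 : Int) ^ k.toNat) = ((10 ^ k.toNat : Nat) : Int) := by push_cast; ring
      have h0 : (k - 0).toNat = k.toNat := by omega
      rw [h0, habs, hpow]
      rw [show PySem.Int.floordiv ((digit.natAbs : Int)) ((10 ^ k.toNat : Nat) : Int) = ((digit.natAbs / 10 ^ k.toNat : Nat) : Int) from PySem.Int.floordiv_natCast _ _]
      rw [show ((10 : Int)) = ((10 : Nat) : Int) from rfl]
      rw [PySem.Int.mod_natCast]
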